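-- pv_equiv track=rewrite | github.com/MEricGb/AI-Joke-Generator | joke_generator.py | _parse_jokes
-- ===== SOURCE A (Python) =====
-- from typing import List, Optional, Dict
--
-- def _parse_jokes(raw_text: str) -> List[str]:
--     """Parse individual jokes from the raw response."""
--     if not raw_text:
--         return []
--
--     jokes = []
--     lines = raw_text.strip().split('\n')
--     current_joke = []
--
--     for line in lines:
--         line = line.strip()
--
--         if not line:
--             if current_joke:
--                 jokes.append('\n'.join(current_joke))
--                 current_joke = []
--             continue
--
--         if line and (line[0].isdigit() or line.startswith('-')):
--             if current_joke:
--                 jokes.append('\n'.join(current_joke))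
--                 current_joke = []
--
--         current_joke.append(line)
--
--     if current_joke:
--         jokes.append('\n'.join(current_joke))
--
--     # Clean up
--     cleaned_jokes = []
--     for joke in jokes:
--         joke = joke.strip()
--         if joke and len(joke) > 10:
--             cleaned_jokes.append(joke)
--
--     return cleaned_jokes if cleaned_jokes else [raw_text]
-- ===== SOURCE B (Python) =====
-- from typing import List
--
-- def _parse_jokes(raw_text: str) -> List[str]:
--     """Parse individual jokes from the raw response."""
--     if not raw_text:
--         return []
--
--     # Stage 1: split the stripped lines into blocks delimited by blank lines.
--     blocks = []
--     block = []
--     for line in raw_text.strip().split('\n'):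
--         s = line.strip()
--         if s:
--             block.append(s)
--         elif block:
--             blocks.append(block)
--             block = []
--     if block:
--         blocks.append(block)
--
--     # Stage 2: split each block at numbered / dashed marker lines.
--     jokes = []
--     for blk in blocks:
--         group = []
--         for s in blk:
--             if group and (s[0].isdigit() or s.startswith('-')):
--                 jokes.append('\n'.join(group))
--                 group = []
--             group.append(s)
--         jokes.append('\n'.join(group))
--
--     # Stage 3: keep only substantial jokes.
--     cleaned = [j for j in map(str.strip, jokes) if len(j) > 10]
--     return cleaned if cleaned else [raw_text]
-- ===== Notes on version B (the rewrite author's own statement) =====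
-- stated objective: alternative
-- what changed: Replaces A's single flat flush-loop with mutable (jokes, current) state by a staged pipeline: lines are first grouped into blank-line-delimited blocks, each block is then split at digit/dash marker lines, and the cleanup becomes a map-then-filter instead of a second accumulator loop.
import Mathlib
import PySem

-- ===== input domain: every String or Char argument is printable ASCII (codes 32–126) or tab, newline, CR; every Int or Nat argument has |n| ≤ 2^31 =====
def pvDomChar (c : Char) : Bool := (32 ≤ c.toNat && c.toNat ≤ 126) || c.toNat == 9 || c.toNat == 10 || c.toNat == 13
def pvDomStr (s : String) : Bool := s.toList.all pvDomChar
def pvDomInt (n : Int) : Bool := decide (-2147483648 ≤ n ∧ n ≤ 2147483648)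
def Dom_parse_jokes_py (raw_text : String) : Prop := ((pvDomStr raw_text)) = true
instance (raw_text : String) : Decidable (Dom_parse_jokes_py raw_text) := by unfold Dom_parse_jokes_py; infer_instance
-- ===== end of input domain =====

-- B parses in two stages (blank-line blocks, then marker splits within each block) plus a
-- map/filter cleanup, instead of A's single flat flush loop; objective: alternative decomposition.


-- ===== PORT A =====
-- `line[0].isdigit()`: first character is a digit (both Pythons literally contain this test;
-- the `none` branch is unreachable, both sources index only nonempty strings)
def pvIsDigit0 (s : String) : Bool :=
  match PySem.Str.pyGet? s 0 with
  | some c => PySem.Chars.isdigit c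
  | none => false

-- `line[0].isdigit() or line.startswith('-')` (shared subexpression of both Pythons)
def pvMark (s : String) : Bool := pvIsDigit0 s || PySem.Str.startswith s "-"

-- one iteration of A's flat loop over (jokes, current_joke)
def pvAStep (p : List String × List String) (line : String) : List String × List String :=
  let s := PySem.Str.strip line
  if s = "" then
    (if p.2 = [] then p else (p.1 ++ [PySem.Str.join "\n" p.2], []))
  else
    let p1 := if s ≠ "" ∧ pvMark s = true then
                (if p.2 = [] then p else (p.1 ++ [PySem.Str.join "\n" p.2], []))
              else p
    (p1.1, p1.2 ++ [s])

def parse_jokes_py (raw_text : String) : List String :=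
  if raw_text = "" then []
  else
    -- raw_text.strip().split('\n'); sep "\n" ≠ "" so split? is always `some`
    let lines := (PySem.Str.split? (PySem.Str.strip raw_text) "\n").getD []
    let st := lines.foldl pvAStep ([], [])
    let jokes := if st.2 = [] then st.1 else st.1 ++ [PySem.Str.join "\n" st.2]
    let cleaned := jokes.foldl (fun acc joke =>
      let j := PySem.Str.strip joke
      if j ≠ "" ∧ 10 < PySem.Str.len j then acc ++ [j] else acc) []
    if cleaned = [] then [raw_text] else cleaned

-- ===== PORT B =====
-- stage 1: one iteration of the blank-line block builder over (blocks, block)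
def pvBlockStep (p : List (List String) × List String) (line : String) :
    List (List String) × List String :=
  let s := PySem.Str.strip line
  if s ≠ "" then (p.1, p.2 ++ [s])
  else if p.2 ≠ [] then (p.1 ++ [p.2], [])
  else p

-- stage 2: one iteration of the marker splitter over (jokes, group)
def pvSplitStep (p : List String × List String) (s : String) : List String × List String :=
  if p.2 ≠ [] ∧ pvMark s = true then (p.1 ++ [PySem.Str.join "\n" p.2], [s])
  else (p.1, p.2 ++ [s])

def pvSplitBlock (blk : List String) : List String :=
  let q := blk.foldl pvSplitStep ([], [])
  q.1 ++ [PySem.Str.join "\n" q.2]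

def parse_jokes_py_alt (raw_text : String) : List String :=
  if raw_text = "" then []
  else
    let bs := ((PySem.Str.split? (PySem.Str.strip raw_text) "\n").getD []).foldl
                pvBlockStep ([], [])
    let blocks := if bs.2 = [] then bs.1 else bs.1 ++ [bs.2]
    let jokes := blocks.flatMap pvSplitBlock
    let cleaned := (jokes.map PySem.Str.strip).filter (fun j => decide (10 < PySem.Str.len j))
    if cleaned = [] then [raw_text] else cleaned

-- ===== PRECONDITION & SPEC =====
def Spec_parse_jokes_py (raw_text : String) (out : List String) : Prop := out = parse_jokes_py_alt raw_text
instance (raw_text : String) (out : List String) : Decidable (Spec_parse_jokes_py raw_text out) := by unfold Spec_parse_jokes_py; infer_instance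

-- ===== CLAIM (what is proved, stated in full; the proofs are below) =====
def Claim_equal_parse_jokes_py : Prop := ∀ (raw_text : String), Dom_parse_jokes_py raw_text → Spec_parse_jokes_py raw_text (parse_jokes_py raw_text)

-- ===== LEMMAS AND PROOFS =====

-- the marker-splitter state after consuming a nonempty block has a nonempty group
lemma pvSplit_snd_ne_nil (bc : List String) (st : List String × List String) (h : bc ≠ []) :
    (bc.foldl pvSplitStep st).2 ≠ [] := by
  induction bc generalizing st with
  | nil => exact absurd rfl h
  | cons b rest ih =>
    by_cases hr : rest = []
    · subst hr
      simp only [List.foldl_cons, List.foldl_nil, pvSplitStep]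
      split <;> simp
    · simpa using ih (pvSplitStep st b) hr

-- one line moves A's flat state exactly as it moves B's (blocks, block) state
lemma pvStep_comm (bl : List (List String)) (bc : List String) (line : String) :
    pvAStep (bl.flatMap pvSplitBlock ++ (bc.foldl pvSplitStep ([], [])).1,
             (bc.foldl pvSplitStep ([], [])).2) line
      = ((pvBlockStep (bl, bc) line).1.flatMap pvSplitBlock
           ++ ((pvBlockStep (bl, bc) line).2.foldl pvSplitStep ([], [])).1,
         ((pvBlockStep (bl, bc) line).2.foldl pvSplitStep ([], [])).2) := by
  unfold pvAStep pvBlockStep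
  by_cases hse : PySem.Str.strip line = ""
  · by_cases hbc : bc = []
    · subst hbc; simp [hse]
    · have hgrp := pvSplit_snd_ne_nil bc ([], []) hbc
      simp [hse, hbc, hgrp, pvSplitBlock, List.append_assoc]
  · by_cases hm : pvMark (PySem.Str.strip line) = true
    · by_cases hbc : bc = []
      · subst hbc; simp [hse, hm, pvSplitStep]
      · have hgrp := pvSplit_snd_ne_nil bc ([], []) hbc
        simp [hse, hm, hgrp, pvSplitStep, List.append_assoc]
    · by_cases hg : (bc.foldl pvSplitStep ([], [])).2 = []
      · simp [hse, hm, hg, pvSplitStep]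
      · simp [hse, hm, hg, pvSplitStep]

-- the whole loop: A's flat fold is tracked by B's block fold
lemma pvFold_comm (lines : List String) (bl : List (List String)) (bc : List String) :
    lines.foldl pvAStep (bl.flatMap pvSplitBlock ++ (bc.foldl pvSplitStep ([], [])).1,
                         (bc.foldl pvSplitStep ([], [])).2)
      = ((lines.foldl pvBlockStep (bl, bc)).1.flatMap pvSplitBlock
           ++ (((lines.foldl pvBlockStep (bl, bc)).2).foldl pvSplitStep ([], [])).1,
         (((lines.foldl pvBlockStep (bl, bc)).2).foldl pvSplitStep ([], [])).2) := by
  induction lines generalizing bl bc with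
  | nil => rfl
  | cons line rest ih =>
    simp only [List.foldl_cons]
    rw [pvStep_comm]
    exact ih (pvBlockStep (bl, bc) line).1 (pvBlockStep (bl, bc) line).2

-- A's cleanup fold is the map-then-filter of B
lemma pvClean_eq (jokes : List String) (acc : List String) :
    jokes.foldl (fun acc joke =>
        let j := PySem.Str.strip joke
        if j ≠ "" ∧ 10 < PySem.Str.len j then acc ++ [j] else acc) acc
      = acc ++ (jokes.map PySem.Str.strip).filter (fun j => decide (10 < PySem.Str.len j)) := by
  induction jokes generalizing acc with
  | nil => simp
  | cons j rest ih =>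
    simp only [List.foldl_cons, List.map_cons, List.filter_cons]
    by_cases h10 : 10 < PySem.Str.len (PySem.Str.strip j)
    · have hne : PySem.Str.strip j ≠ "" := by
        intro h
        rw [h] at h10
        simp [PySem.Str.len_eq] at h10
      rw [if_pos ⟨hne, h10⟩, ih]
      have h10' : 10 < (PySem.Chars.strip j.toList).length := by simpa using h10
      simp [h10']
    · rw [if_neg (by tauto), ih]
      have h10' : ¬ 10 < (PySem.Chars.strip j.toList).length := by simpa using h10
      simp [h10']

-- gluing: A's final flush of (jokes, current) equals B's flatMap over the final blocks
lemma pvAssemble (bl : List (List String)) (bc : List String) :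
    (if (bc.foldl pvSplitStep ([], [])).2 = []
       then bl.flatMap pvSplitBlock ++ (bc.foldl pvSplitStep ([], [])).1
       else (bl.flatMap pvSplitBlock ++ (bc.foldl pvSplitStep ([], [])).1)
              ++ [PySem.Str.join "\n" (bc.foldl pvSplitStep ([], [])).2])
      = (if bc = [] then bl else bl ++ [bc]).flatMap pvSplitBlock := by
  by_cases hbc : bc = []
  · subst hbc; simp
  · have hgrp := pvSplit_snd_ne_nil bc ([], []) hbc
    simp [hbc, hgrp, pvSplitBlock, List.append_assoc]

-- ===== VERDICT (by name: the statement is the Claim_ definition above) =====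
theorem parse_jokes_py_spec : Claim_equal_parse_jokes_py := by
  intro raw_text _
  unfold Spec_parse_jokes_py parse_jokes_py parse_jokes_py_alt
  by_cases h0 : raw_text = ""
  · simp [h0]
  · simp only [h0, if_false]
    have hfold := pvFold_comm ((PySem.Str.split? (PySem.Str.strip raw_text) "\n").getD []) [] []
    simp only [List.flatMap_nil, List.foldl_nil, List.nil_append] at hfold
    rw [hfold, pvClean_eq, List.nil_append, pvAssemble]
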